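-- pv_equiv track=rewrite | github.com/bennyd312/Adventofcode24 | 9b.py | Convert_Diskmap_to_sequence
-- ===== SOURCE A (Python) =====
-- def Convert_Diskmap_to_sequence(diskmap):
--     """
--     Converts a diskmap, ie numbers "12345" to [0,.,.,1,1,1,.,.,.,.,2,2,2,2,2] (a sequence)
--     """
--     n = len(diskmap)
--     IDS = [] #id's used
--     freespace_indices = [] #indices of dots / freespace
--     sequence_stripped_indices = []
--     C = [] # sequence without dots
--     sequence = [] #final sequence
--     id_blocks = []
--
--     index = 0
--     current_id = 0
--     sequence_length = 0
--
--     while index<n: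
--         if index%2==0:
--             IDS.append(current_id)
--             for j in range(diskmap[index]):
--                 id_blocks.append(current_id)
--                 sequence.append(current_id)
--                 C.append(current_id)
--                 sequence_stripped_indices.append(sequence_length)
--                 sequence_length += 1
--             current_id += 1
--             index += 1
--         else:
--             for j in range(diskmap[index]):
--                 id_blocks.append(current_id)
--                 sequence.append(-1)
--                 freespace_indices.append(sequence_length)
--                 sequence_length += 1
--             index += 1
--     return sequence,freespace_indices,C,id_blocks,sequence_stripped_indices
-- ===== SOURCE B (Python) =====
-- def Convert_Diskmap_to_sequence(diskmap):
--     # One build pass for sequence and id_blocks, then derive the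
--     # three auxiliary lists from sequence by separate scans.
--     sequence = []
--     id_blocks = []
--     current_id = 0
--     for i, d in enumerate(diskmap):
--         if i % 2 == 0:
--             sequence += [current_id] * d
--             id_blocks += [current_id] * d
--             current_id += 1
--         else:
--             sequence += [-1] * d
--             id_blocks += [current_id] * d
--     freespace_indices = [i for i, v in enumerate(sequence) if v == -1]
--     C = [v for v in sequence if v != -1]
--     sequence_stripped_indices = [i for i, v in enumerate(sequence) if v != -1]
--     return sequence, freespace_indices, C, id_blocks, sequence_stripped_indices
-- ===== Notes on version B (the rewrite author's own statement) =====
-- stated objective: simpler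
-- what changed: A builds all five lists simultaneously in one interleaved while-loop with an explicit length counter; B builds only sequence and id_blocks in one pass (using list repetition instead of inner append loops) and then derives freespace_indices, C and sequence_stripped_indices from sequence by separate scans.
import Mathlib
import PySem

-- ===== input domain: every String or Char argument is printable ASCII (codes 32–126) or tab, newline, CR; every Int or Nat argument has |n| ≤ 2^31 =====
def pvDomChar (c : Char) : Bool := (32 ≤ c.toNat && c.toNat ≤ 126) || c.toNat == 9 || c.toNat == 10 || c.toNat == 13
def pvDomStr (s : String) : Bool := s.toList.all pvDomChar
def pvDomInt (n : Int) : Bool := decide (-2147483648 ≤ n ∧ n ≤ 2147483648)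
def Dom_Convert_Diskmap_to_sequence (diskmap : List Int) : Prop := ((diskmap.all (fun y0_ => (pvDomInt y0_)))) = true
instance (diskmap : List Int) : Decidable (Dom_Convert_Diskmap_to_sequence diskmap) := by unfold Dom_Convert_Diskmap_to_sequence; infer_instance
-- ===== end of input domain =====

-- B replaces A's single interleaved while-loop by one build pass (sequence, id_blocks)
-- plus separate derivation scans for the three auxiliary lists (objective: simpler).

-- ===== PORT A =====
-- literal transliteration of A's while-loop; state = (IDS, fs, st, C, sq, ib, current_id, sequence_length)
def pvALoop : List Int → Nat → Int → Int → List Int → List Int → List Int → List Int → List Int → List Int → (List Int × List Int × List Int × List Int × List Int)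
  | [], _, _, _, _IDS, fs, st, c, sq, ib => (sq, fs, c, ib, st)
  | d :: t, idx, cid, slen, IDS, fs, st, c, sq, ib =>
    if idx % 2 = 0 then
      -- for j in range(diskmap[index]): append to id_blocks, sequence, C, stripped_indices
      let r := (PySem.List.pyRange 0 d 1).foldl
          (fun (s : List Int × List Int × List Int × List Int × Int) _ =>
            (s.1 ++ [cid], s.2.1 ++ [cid], s.2.2.1 ++ [cid], s.2.2.2.1 ++ [s.2.2.2.2], s.2.2.2.2 + 1))
          (ib, sq, c, st, slen)
      pvALoop t (idx + 1) (cid + 1) r.2.2.2.2 (IDS ++ [cid]) fs r.2.2.2.1 r.2.2.1 r.2.1 r.1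
    else
      -- for j in range(diskmap[index]): append to id_blocks, sequence, freespace_indices
      let r := (PySem.List.pyRange 0 d 1).foldl
          (fun (s : List Int × List Int × List Int × Int) _ =>
            (s.1 ++ [cid], s.2.1 ++ [-1], s.2.2.1 ++ [s.2.2.2], s.2.2.2 + 1))
          (ib, sq, fs, slen)
      pvALoop t (idx + 1) cid r.2.2.2 IDS r.2.2.1 st c r.2.1 r.1

def Convert_Diskmap_to_sequence (diskmap : List Int) : List Int × List Int × List Int × List Int × List Int :=
  pvALoop diskmap 0 0 0 [] [] [] [] [] []

-- ===== PORT B =====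
-- loop body of B's single build pass over enumerate(diskmap); [x]*d is List.replicate d.toNat x (exact: negative d gives [])
def pvBStep (s : List Int × List Int × Int) (p : Int × Int) : List Int × List Int × Int :=
  if PySem.Int.mod p.1 2 = 0 then
    (s.1 ++ List.replicate p.2.toNat s.2.2, s.2.1 ++ List.replicate p.2.toNat s.2.2, s.2.2 + 1)
  else
    (s.1 ++ List.replicate p.2.toNat (-1), s.2.1 ++ List.replicate p.2.toNat s.2.2, s.2.2)

def Convert_Diskmap_to_sequence_alt (diskmap : List Int) : List Int × List Int × List Int × List Int × List Int :=
  let P := (PySem.List.enumerate diskmap 0).foldl pvBStep ([], [], 0)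
  let sequence := P.1
  let id_blocks := P.2.1
  let freespace_indices := (PySem.List.enumerate sequence 0).filterMap (fun p => if p.2 = -1 then some p.1 else none)
  let C := sequence.filter (fun v => decide (v ≠ -1))
  let stripped := (PySem.List.enumerate sequence 0).filterMap (fun p => if p.2 ≠ -1 then some p.1 else none)
  (sequence, freespace_indices, C, id_blocks, stripped)

-- ===== PRECONDITION & SPEC =====
def Spec_Convert_Diskmap_to_sequence (diskmap : List Int) (out : List Int × List Int × List Int × List Int × List Int) : Prop := out = Convert_Diskmap_to_sequence_alt diskmap
instance (diskmap : List Int) (out : List Int × List Int × List Int × List Int × List Int) : Decidable (Spec_Convert_Diskmap_to_sequence diskmap out) := by unfold Spec_Convert_Diskmap_to_sequence; infer_instance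

-- ===== CLAIM (what is proved, stated in full; the proofs are below) =====
def Claim_equal_Convert_Diskmap_to_sequence : Prop := ∀ (diskmap : List Int), Dom_Convert_Diskmap_to_sequence diskmap → Spec_Convert_Diskmap_to_sequence diskmap (Convert_Diskmap_to_sequence diskmap)

-- ===== LEMMAS AND PROOFS =====

-- [k, k+1, ..., k+n-1]
def pvIdxFrom (k : Int) : Nat → List Int
  | 0 => []
  | n + 1 => k :: pvIdxFrom (k + 1) n

-- indices of -1 in a list, counting from k
def pvFsOf (k : Int) : List Int → List Int
  | [] => []
  | v :: t => if v = -1 then k :: pvFsOf (k + 1) t else pvFsOf (k + 1) t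

-- indices of non--1 entries, counting from k
def pvStOf (k : Int) : List Int → List Int
  | [] => []
  | v :: t => if v = -1 then pvStOf (k + 1) t else k :: pvStOf (k + 1) t

lemma pvEnumFs : ∀ (xs : List Int) (k : Int),
    (PySem.List.enumerate xs k).filterMap (fun p => if p.2 = -1 then some p.1 else none) = pvFsOf k xs := by
  intro xs
  induction xs with
  | nil => intro k; simp [PySem.List.enumerate_nil, pvFsOf]
  | cons v t ih =>
    intro k
    simp only [PySem.List.enumerate_cons, List.filterMap_cons, pvFsOf]
    split_ifs with h <;> simp [ih]

lemma pvEnumSt : ∀ (xs : List Int) (k : Int),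
    (PySem.List.enumerate xs k).filterMap (fun p => if p.2 = -1 then none else some p.1) = pvStOf k xs := by
  intro xs
  induction xs with
  | nil => intro k; simp [PySem.List.enumerate_nil, pvStOf]
  | cons v t ih =>
    intro k
    simp only [PySem.List.enumerate_cons, List.filterMap_cons, pvStOf]
    split_ifs with h <;> simp_all

lemma pvFsOf_append : ∀ (xs : List Int) (k : Int) (ys : List Int),
    pvFsOf k (xs ++ ys) = pvFsOf k xs ++ pvFsOf (k + xs.length) ys := by
  intro xs
  induction xs with
  | nil => intro k ys; simp [pvFsOf]
  | cons v t ih =>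
    intro k ys
    simp only [List.cons_append, pvFsOf]
    have harith : k + 1 + (t.length : Int) = k + ((t.length : Int) + 1) := by ring
    split_ifs with h <;> simp [ih, harith]

lemma pvStOf_append : ∀ (xs : List Int) (k : Int) (ys : List Int),
    pvStOf k (xs ++ ys) = pvStOf k xs ++ pvStOf (k + xs.length) ys := by
  intro xs
  induction xs with
  | nil => intro k ys; simp [pvStOf]
  | cons v t ih =>
    intro k ys
    simp only [List.cons_append, pvStOf]
    have harith : k + 1 + (t.length : Int) = k + ((t.length : Int) + 1) := by ring
    split_ifs with h <;> simp [ih, harith]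

lemma pvFsOf_replicate_ne (c : Int) (hc : c ≠ -1) : ∀ (n : Nat) (k : Int),
    pvFsOf k (List.replicate n c) = [] := by
  intro n
  induction n with
  | zero => intro k; simp [pvFsOf]
  | succ m ih => intro k; simp [List.replicate_succ, pvFsOf, hc, ih]

lemma pvFsOf_replicate_neg : ∀ (n : Nat) (k : Int),
    pvFsOf k (List.replicate n (-1 : Int)) = pvIdxFrom k n := by
  intro n
  induction n with
  | zero => intro k; simp [pvFsOf, pvIdxFrom]
  | succ m ih => intro k; simp [List.replicate_succ, pvFsOf, pvIdxFrom, ih]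

lemma pvStOf_replicate_ne (c : Int) (hc : c ≠ -1) : ∀ (n : Nat) (k : Int),
    pvStOf k (List.replicate n c) = pvIdxFrom k n := by
  intro n
  induction n with
  | zero => intro k; simp [pvStOf, pvIdxFrom]
  | succ m ih => intro k; simp [List.replicate_succ, pvStOf, pvIdxFrom, hc, ih]

lemma pvStOf_replicate_neg : ∀ (n : Nat) (k : Int),
    pvStOf k (List.replicate n (-1 : Int)) = [] := by
  intro n
  induction n with
  | zero => intro k; simp [pvStOf]
  | succ m ih => intro k; simp [List.replicate_succ, pvStOf, ih]

lemma pvFilter_replicate_ne (c : Int) (hc : c ≠ -1) (n : Nat) :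
    (List.replicate n c).filter (fun v => decide (v ≠ -1)) = List.replicate n c := by
  simp [hc]

lemma pvFilter_replicate_neg (n : Nat) :
    (List.replicate n (-1 : Int)).filter (fun v => decide (v ≠ -1)) = [] := by
  simp

-- A's even inner loop: only the length of the fold's list matters
lemma pvFoldEven (cid : Int) : ∀ (l ib sq c st : List Int) (slen : Int),
    l.foldl (fun (s : List Int × List Int × List Int × List Int × Int) _ =>
        (s.1 ++ [cid], s.2.1 ++ [cid], s.2.2.1 ++ [cid], s.2.2.2.1 ++ [s.2.2.2.2], s.2.2.2.2 + 1))
      (ib, sq, c, st, slen)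
    = (ib ++ List.replicate l.length cid, sq ++ List.replicate l.length cid,
       c ++ List.replicate l.length cid, st ++ pvIdxFrom slen l.length, slen + l.length) := by
  intro l
  induction l with
  | nil => intro ib sq c st slen; simp [pvIdxFrom]
  | cons x t ih =>
    intro ib sq c st slen
    simp only [List.foldl_cons, ih, List.length_cons, List.replicate_succ, pvIdxFrom, Prod.mk.injEq]
    refine ⟨by simp, by simp, by simp, by simp, by push_cast; ring⟩

-- A's odd inner loop
lemma pvFoldOdd (cid : Int) : ∀ (l ib sq fs : List Int) (slen : Int),
    l.foldl (fun (s : List Int × List Int × List Int × Int) _ =>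
        (s.1 ++ [cid], s.2.1 ++ [-1], s.2.2.1 ++ [s.2.2.2], s.2.2.2 + 1))
      (ib, sq, fs, slen)
    = (ib ++ List.replicate l.length cid, sq ++ List.replicate l.length (-1),
       fs ++ pvIdxFrom slen l.length, slen + l.length) := by
  intro l
  induction l with
  | nil => intro ib sq fs slen; simp [pvIdxFrom]
  | cons x t ih =>
    intro ib sq fs slen
    simp only [List.foldl_cons, ih, List.length_cons, List.replicate_succ, pvIdxFrom, Prod.mk.injEq]
    refine ⟨by simp, by simp, by simp, by push_cast; ring⟩

lemma pvModCast (idx : Nat) : PySem.Int.mod (idx : Int) 2 = ((idx % 2 : Nat) : Int) := by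
  exact_mod_cast PySem.Int.mod_natCast idx 2

-- main invariant: A's loop, with the three auxiliary accumulators expressed as functions
-- of the sequence accumulator, tracks B's build fold
lemma pvMain : ∀ (rest : List Int) (idx : Nat) (cid : Int) (sq ib IDS : List Int),
    0 ≤ cid →
    pvALoop rest idx cid (sq.length : Int) IDS (pvFsOf 0 sq) (pvStOf 0 sq)
        (sq.filter (fun v => decide (v ≠ -1))) sq ib
    = (let P := (PySem.List.enumerate rest (idx : Int)).foldl pvBStep (sq, ib, cid)
       (P.1, pvFsOf 0 P.1, P.1.filter (fun v => decide (v ≠ -1)), P.2.1, pvStOf 0 P.1)) := by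
  intro rest
  induction rest with
  | nil =>
    intro idx cid sq ib IDS _
    simp [pvALoop, PySem.List.enumerate_nil]
  | cons d t ih =>
    intro idx cid sq ib IDS hcid
    have hcne : cid ≠ -1 := by omega
    have hmod := pvModCast idx
    by_cases hpar : idx % 2 = 0
    · -- even index: file blocks
      simp only [pvALoop, hpar]
      rw [pvFoldEven]
      have hlen : (PySem.List.pyRange 0 d 1).length = d.toNat := by
        simp [PySem.List.length_pyRange_one]
      rw [hlen]
      set n := d.toNat with hn
      have hsq : pvFsOf 0 (sq ++ List.replicate n cid) = pvFsOf 0 sq := by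
        rw [pvFsOf_append, pvFsOf_replicate_ne cid hcne]; simp
      have hst : pvStOf 0 (sq ++ List.replicate n cid)
          = pvStOf 0 sq ++ pvIdxFrom (sq.length : Int) n := by
        rw [pvStOf_append, pvStOf_replicate_ne cid hcne]; simp
      have hc : (sq ++ List.replicate n cid).filter (fun v => decide (v ≠ -1))
          = sq.filter (fun v => decide (v ≠ -1)) ++ List.replicate n cid := by
        rw [List.filter_append, pvFilter_replicate_ne cid hcne]
      have hlen2 : ((sq ++ List.replicate n cid).length : Int) = (sq.length : Int) + n := by
        simp
      have := ih (idx + 1) (cid + 1) (sq ++ List.replicate n cid)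
          (ib ++ List.replicate n cid) (IDS ++ [cid]) (by omega)
      rw [hlen2, hsq, hst, hc] at this
      push_cast at this
      simp only [PySem.List.enumerate_cons, List.foldl_cons, pvBStep, hmod, hpar]
      push_cast
      simpa using this
    · -- odd index: free space
      simp only [pvALoop, if_neg hpar]
      rw [pvFoldOdd]
      have hlen : (PySem.List.pyRange 0 d 1).length = d.toNat := by
        simp [PySem.List.length_pyRange_one]
      rw [hlen]
      set n := d.toNat with hn
      have hfs : pvFsOf 0 (sq ++ List.replicate n (-1))
          = pvFsOf 0 sq ++ pvIdxFrom (sq.length : Int) n := by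
        rw [pvFsOf_append, pvFsOf_replicate_neg]; simp
      have hst : pvStOf 0 (sq ++ List.replicate n (-1)) = pvStOf 0 sq := by
        rw [pvStOf_append, pvStOf_replicate_neg]; simp
      have hc : (sq ++ List.replicate n (-1)).filter (fun v => decide (v ≠ -1))
          = sq.filter (fun v => decide (v ≠ -1)) := by
        rw [List.filter_append, pvFilter_replicate_neg]; simp
      have hlen2 : ((sq ++ List.replicate n (-1 : Int)).length : Int) = (sq.length : Int) + n := by
        simp
      have := ih (idx + 1) cid (sq ++ List.replicate n (-1)) (ib ++ List.replicate n cid) IDS hcid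
      rw [hlen2, hfs, hst, hc] at this
      push_cast at this
      have hmodne : ¬ PySem.Int.mod (↑idx) 2 = 0 := by
        rw [hmod]; exact_mod_cast fun h => hpar (by exact_mod_cast h)
      simp only [PySem.List.enumerate_cons, List.foldl_cons, pvBStep, if_neg hmodne]
      push_cast
      simpa using this

-- ===== VERDICT (by name: the statement is the Claim_ definition above) =====
theorem Convert_Diskmap_to_sequence_spec : Claim_equal_Convert_Diskmap_to_sequence := by
  intro diskmap _
  unfold Spec_Convert_Diskmap_to_sequence Convert_Diskmap_to_sequence Convert_Diskmap_to_sequence_alt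
  have h := pvMain diskmap 0 0 [] [] [] (le_refl 0)
  simp only [List.length_nil, Nat.cast_zero, pvFsOf, pvStOf, List.filter_nil] at h
  rw [h]
  simp [pvEnumFs, pvEnumSt]
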